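-- pv_equiv track=rewrite | github.com/sspaka/Algorithm | Programmers/kakao/거리두기확인하기.py | check3
-- ===== SOURCE A (Python) =====
-- def check3(place):
--     dx = [-2, 2, 0, 0]
--     dy = [0, 0, -2, 2]
--     for row in range(5):
--         for col in range(5):
--             if place[row][col] == 'P':
--                 for i in range(4):
--                     new_row, new_col = row + dx[i], col + dy[i]
--                     if 0 <= new_row <= 4 and 0 <= new_col <= 4 and place[new_row][new_col] == 'P':
--                         if place[new_row - (dx[i] // 2)][new_col - (dy[i] // 2)] == 'O':
--                             return True
--     return False
-- ===== SOURCE B (Python) =====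
-- def check3(place):
--     # One streaming pass over the five rows, remembering rows already seen.
--     # A row violates horizontally iff its 5-wide window contains the substring
--     # 'POP'; vertically iff some column shows P (two rows up), O (one row up),
--     # P (here) -- checked backward against the two retained rows, in the order
--     # top-P, bottom-P, middle-O.  No dx/dy offset probing.
--     seen = []
--     for r in range(5):
--         row = place[r]
--         if 'POP' in row[:5]:
--             return True
--         if len(seen) >= 2 and any(seen[-2][c] == 'P' and row[c] == 'P' and seen[-1][c] == 'O'
--                                   for c in range(5)):
--             return True
--         seen.append(row)
--     return False
-- ===== Notes on version B (the rewrite author's own statement) =====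
-- stated objective: alternative
-- what changed: Replaces A's per-'P' probing of four dx/dy offsets with midpoint floor-division by a streaming pass: each row is tested for the substring 'POP' in its 5-wide window, and a backward column check against the two retained previous rows catches vertical P-O-P; no offset arrays, no probing ahead.
import Mathlib
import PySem

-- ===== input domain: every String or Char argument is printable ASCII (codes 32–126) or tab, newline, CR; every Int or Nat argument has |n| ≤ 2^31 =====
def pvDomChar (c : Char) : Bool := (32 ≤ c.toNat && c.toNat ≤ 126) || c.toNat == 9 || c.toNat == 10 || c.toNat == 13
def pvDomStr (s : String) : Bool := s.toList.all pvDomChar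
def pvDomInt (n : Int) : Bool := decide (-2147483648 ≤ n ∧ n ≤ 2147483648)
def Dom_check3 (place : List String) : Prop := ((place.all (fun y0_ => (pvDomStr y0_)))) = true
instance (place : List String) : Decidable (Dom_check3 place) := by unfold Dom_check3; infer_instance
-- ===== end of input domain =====

-- B replaces A's per-'P' probing of four dx/dy offsets by a streaming pass:
-- each row's 5-wide window is tested for the substring "POP", and a backward
-- column check against the two retained previous rows catches vertical P-O-P;
-- malformed grids on which A raises IndexError lie outside Pre_check3.
-- Cell access place[r][c] in A's port uses getD defaults; this is exact under
-- Pre_check3, where Python A performs no out-of-range access before returning.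
def pvCell (place : List String) (r c : Nat) : Char :=
  ((place.getD r "").toList).getD c ' '

-- ===== PORT A =====
def pvDx : List Int := [-2, 2, 0, 0]
def pvDy : List Int := [0, 0, -2, 2]

def check3 (place : List String) : Bool :=
  (List.range 5).any fun row =>
    (List.range 5).any fun col =>
      pvCell place row col == 'P' &&
        (List.range 4).any fun i =>
          let dx := pvDx.getD i 0
          let dy := pvDy.getD i 0
          let nr : Int := (row : Int) + dx
          let nc : Int := (col : Int) + dy
          decide (0 ≤ nr ∧ nr ≤ 4 ∧ 0 ≤ nc ∧ nc ≤ 4) &&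
          (pvCell place nr.toNat nc.toNat == 'P') &&
          (pvCell place (nr - PySem.Int.floordiv dx 2).toNat (nc - PySem.Int.floordiv dy 2).toNat == 'O')

-- ===== PORT B =====
-- 'POP' in line — substring scan over consecutive triples.
def pvHasPOP : List Char → Bool
  | a :: b :: c :: rest => (a == 'P' && b == 'O' && c == 'P') || pvHasPOP (b :: c :: rest)
  | _ => false

-- the backward column check: top P (two rows up), bottom P (here), middle O.
-- Cell reads row[c] are ported with getD ' '; exact under Pre_check3, where
-- B's Python performs no out-of-range access before returning.
def pvVert (top mid row : List Char) : Bool :=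
  (List.range 5).any fun c =>
    (top.getD c ' ' == 'P') && (row.getD c ' ' == 'P') && (mid.getD c ' ' == 'O')

-- the row loop; 'seen' holds earlier rows newest first (python's seen[-1] is
-- seen.getD 0, seen[-2] is seen.getD 1); the early returns are the disjuncts.
def pvScan (place : List String) : List Nat → List (List Char) → Bool
  | [], _ => false
  | r :: rs, seen =>
    let row := (place.getD r "").toList
    pvHasPOP (row.take 5) ||
      (decide (2 ≤ seen.length) && pvVert (seen.getD 1 []) (seen.getD 0 []) row) ||
      pvScan place rs (row :: seen)

def check3_alt (place : List String) : Bool := pvScan place (List.range 5) []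

-- ===== PRECONDITION & SPEC =====
-- Pre_check3 holds exactly on the inputs where Python A returns (no IndexError):
-- either the grid has five rows of length ≥ 5, or the row-major scan reaches a
-- distancing violation ('trigger') before its first out-of-range access, i.e.
-- every earlier 'P' cell's probes stay in bounds.
def pvLen (place : List String) (r : Nat) : Nat := (place.getD r "").length

def pvReach (place : List String) (r c : Nat) : Bool :=
  decide (r < place.length) && (List.range r).all (fun r' => decide (5 ≤ pvLen place r')) &&
  decide (c < pvLen place r)

def pvDownSafe (place : List String) (r c : Nat) : Bool :=
  !(decide (r ≤ 2)) ||
    (decide (r + 2 < place.length) && decide (c < pvLen place (r + 2)) &&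
     (!(pvCell place (r + 2) c == 'P') || decide (c < pvLen place (r + 1))))

def pvProbeSafe (place : List String) (r c : Nat) : Bool :=
  pvDownSafe place r c && (!(decide (c ≤ 2)) || decide (c + 2 < pvLen place r))

def pvTrigger (place : List String) (r c : Nat) : Bool :=
  (pvCell place r c == 'P') &&
    ((decide (r ≤ 2) && decide (r + 2 < place.length) && decide (c < pvLen place (r + 2)) &&
        (pvCell place (r + 2) c == 'P') && decide (c < pvLen place (r + 1)) &&
        (pvCell place (r + 1) c == 'O'))
     ||
     (pvDownSafe place r c && decide (c ≤ 2) && decide (c + 2 < pvLen place r) &&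
        (pvCell place r (c + 2) == 'P') && (pvCell place r (c + 1) == 'O')))

def Pre_check3 (place : List String) : Prop :=
  ((decide (5 ≤ place.length) && (List.range 5).all (fun r => decide (5 ≤ pvLen place r)))
   ||
   ((List.range 5).any fun r => (List.range 5).any fun c =>
      pvReach place r c && pvTrigger place r c &&
        ((List.range 5).all fun r' => (List.range 5).all fun c' =>
           !(decide (r' < r ∨ (r' = r ∧ c' < c)) && (pvCell place r' c' == 'P') &&
             pvReach place r' c')
           || pvProbeSafe place r' c'))) = true
instance (place : List String) : Decidable (Pre_check3 place) := by
  unfold Pre_check3; infer_instance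

def pvWitness_check3 : List String := ["OOOOO", "OOOOO", "OOOOO", "OOOOO", "OOOOO"]

def Spec_check3 (place : List String) (out : Bool) : Prop := out = check3_alt place
instance (place : List String) (out : Bool) : Decidable (Spec_check3 place out) := by unfold Spec_check3; infer_instance

-- ===== CLAIM (what is proved, stated in full; the proofs are below) =====
def Claim_equal_check3 : Prop := ∀ (place : List String), Dom_check3 place → Pre_check3 place → Spec_check3 place (check3 place)

-- ===== LEMMAS AND PROOFS =====
-- A's inner offset loop at a cell (row, col), characterised in Nat arithmetic.
set_option maxHeartbeats 1000000 in
theorem inner_iff (place : List String) (row col : Nat) (hr : row < 5) (hc : col < 5) :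
    ((List.range 4).any fun i =>
          let dx := pvDx.getD i 0
          let dy := pvDy.getD i 0
          let nr : Int := (row : Int) + dx
          let nc : Int := (col : Int) + dy
          decide (0 ≤ nr ∧ nr ≤ 4 ∧ 0 ≤ nc ∧ nc ≤ 4) &&
          (pvCell place nr.toNat nc.toNat == 'P') &&
          (pvCell place (nr - PySem.Int.floordiv dx 2).toNat (nc - PySem.Int.floordiv dy 2).toNat == 'O')) = true
    ↔ ((2 ≤ row ∧ pvCell place (row - 2) col = 'P' ∧ pvCell place (row - 1) col = 'O') ∨
       (row ≤ 2 ∧ pvCell place (row + 2) col = 'P' ∧ pvCell place (row + 1) col = 'O') ∨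
       (2 ≤ col ∧ pvCell place row (col - 2) = 'P' ∧ pvCell place row (col - 1) = 'O') ∨
       (col ≤ 2 ∧ pvCell place row (col + 2) = 'P' ∧ pvCell place row (col + 1) = 'O')) := by
  interval_cases row <;> interval_cases col <;>
    simp [pvDx, pvDy, PySem.Int.floordiv, show (List.range 4) = [0,1,2,3] from rfl]

theorem A_iff (place : List String) : check3 place = true ↔
    ∃ row, row < 5 ∧ ∃ col, col < 5 ∧ pvCell place row col = 'P' ∧
      ((2 ≤ row ∧ pvCell place (row - 2) col = 'P' ∧ pvCell place (row - 1) col = 'O') ∨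
       (row ≤ 2 ∧ pvCell place (row + 2) col = 'P' ∧ pvCell place (row + 1) col = 'O') ∨
       (2 ≤ col ∧ pvCell place row (col - 2) = 'P' ∧ pvCell place row (col - 1) = 'O') ∨
       (col ≤ 2 ∧ pvCell place row (col + 2) = 'P' ∧ pvCell place row (col + 1) = 'O')) := by
  unfold check3
  simp only [List.any_eq_true, List.mem_range, beq_iff_eq, Bool.and_eq_true]
  constructor
  · rintro ⟨row, hr, col, hc, hP, h⟩
    exact ⟨row, hr, col, hc, hP, (inner_iff place row col hr hc).mp (by simpa using h)⟩
  · rintro ⟨row, hr, col, hc, hP, h⟩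
    exact ⟨row, hr, col, hc, hP, by simpa using (inner_iff place row col hr hc).mpr h⟩

theorem getD_take5 (L : List Char) (j : Nat) (h : j < 5) :
    (L.take 5).getD j ' ' = L.getD j ' ' := by
  by_cases hj : j < L.length
  · rw [List.getD_eq_getElem _ _ (by simp; omega), List.getD_eq_getElem _ _ hj]
    simp [List.getElem_take]
  · rw [List.getD_eq_default _ _ (by simp; omega), List.getD_eq_default _ _ (by omega)]

theorem hasPOP_iff (L : List Char) : pvHasPOP L = true ↔
    ∃ i, i + 2 < L.length ∧ L.getD i ' ' = 'P' ∧ L.getD (i+1) ' ' = 'O' ∧ L.getD (i+2) ' ' = 'P' := by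
  induction L with
  | nil => simp [pvHasPOP]
  | cons a L ih =>
    cases L with
    | nil => simp [pvHasPOP]
    | cons b L =>
      cases L with
      | nil =>
        simp only [pvHasPOP, List.length_cons]
        constructor
        · intro h; exact absurd h (by simp)
        · rintro ⟨i, hi, -⟩; simp at hi
      | cons c rest =>
        simp only [pvHasPOP, Bool.or_eq_true, Bool.and_eq_true, beq_iff_eq, ih]
        constructor
        · rintro (⟨⟨hP, hO⟩, hP2⟩ | ⟨i, hi, h1, h2, h3⟩)
          · exact ⟨0, by simp, by simpa using hP, by simpa using hO, by simpa using hP2⟩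
          · refine ⟨i + 1, by simp at hi ⊢; omega, ?_, ?_, ?_⟩ <;>
              simpa [List.getD_cons_succ] using ‹_›
        · rintro ⟨i, hi, h1, h2, h3⟩
          cases i with
          | zero => exact Or.inl ⟨⟨by simpa using h1, by simpa using h2⟩, by simpa using h3⟩
          | succ j =>
            refine Or.inr ⟨j, by simp at hi ⊢; omega, ?_, ?_, ?_⟩ <;>
              simpa [List.getD_cons_succ] using ‹_›


-- the horizontal window: 'POP' in row[:5], characterised by pvCell.
theorem hrow_iff (place : List String) (r : Nat) :
    pvHasPOP (((place.getD r "").toList).take 5) = true ↔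
      ∃ c, c ≤ 2 ∧ pvCell place r c = 'P' ∧ pvCell place r (c + 1) = 'O' ∧
        pvCell place r (c + 2) = 'P' := by
  rw [hasPOP_iff]
  constructor
  · rintro ⟨i, hi, h1, h2, h3⟩
    simp only [List.length_take] at hi
    rw [getD_take5 _ _ (by omega)] at h1 h2 h3
    exact ⟨i, by omega, h1, h2, h3⟩
  · rintro ⟨c, hc, h1, h2, h3⟩
    simp only [pvCell] at h1 h2 h3
    have hlen : c + 2 < (place.getD r "").toList.length := by
      by_contra hl
      rw [List.getD_eq_default _ _ (by omega)] at h3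
      exact absurd h3 (by decide)
    refine ⟨c, ?_, ?_, ?_, ?_⟩
    · simp only [List.length_take]; omega
    · rw [getD_take5 _ _ (by omega)]; exact h1
    · rw [getD_take5 _ _ (by omega)]; exact h2
    · rw [getD_take5 _ _ (by omega)]; exact h3

-- the backward column check, characterised by pvCell.
theorem vert_iff (place : List String) (a b c : Nat) :
    pvVert ((place.getD a "").toList) ((place.getD b "").toList) ((place.getD c "").toList) = true ↔
      ∃ k, k < 5 ∧ pvCell place a k = 'P' ∧ pvCell place c k = 'P' ∧ pvCell place b k = 'O' := by
  unfold pvVert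
  simp only [List.any_eq_true, List.mem_range, Bool.and_eq_true, beq_iff_eq, pvCell]
  exact ⟨fun ⟨k, hk, ⟨h1, h2⟩, h3⟩ => ⟨k, hk, h1, h2, h3⟩,
         fun ⟨k, hk, h1, h2, h3⟩ => ⟨k, hk, ⟨h1, h2⟩, h3⟩⟩

theorem B_iff (place : List String) : check3_alt place = true ↔
    ∃ r, r < 5 ∧ ∃ c, c < 5 ∧ pvCell place r c = 'P' ∧
      ((r ≤ 2 ∧ pvCell place (r + 2) c = 'P' ∧ pvCell place (r + 1) c = 'O') ∨
       (c ≤ 2 ∧ pvCell place r (c + 2) = 'P' ∧ pvCell place r (c + 1) = 'O')) := by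
  have e : check3_alt place = true ↔
      (pvHasPOP (((place.getD 0 "").toList).take 5) = true ∨
       pvHasPOP (((place.getD 1 "").toList).take 5) = true ∨
       pvHasPOP (((place.getD 2 "").toList).take 5) = true ∨
       pvVert ((place.getD 0 "").toList) ((place.getD 1 "").toList) ((place.getD 2 "").toList) = true ∨
       pvHasPOP (((place.getD 3 "").toList).take 5) = true ∨
       pvVert ((place.getD 1 "").toList) ((place.getD 2 "").toList) ((place.getD 3 "").toList) = true ∨
       pvHasPOP (((place.getD 4 "").toList).take 5) = true ∨
       pvVert ((place.getD 2 "").toList) ((place.getD 3 "").toList) ((place.getD 4 "").toList) = true) := by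
    simp only [check3_alt, show (List.range 5) = [0, 1, 2, 3, 4] from rfl, pvScan,
      List.getD_cons_zero, List.getD_cons_succ, List.length_nil, List.length_cons,
      Bool.or_eq_true, Bool.and_eq_true, decide_eq_true_eq]
    norm_num
    simp only [or_assoc]
  rw [e]
  constructor
  · rintro (h | h | h | h | h | h | h | h)
    · obtain ⟨c, hc, h1, h2, h3⟩ := (hrow_iff place 0).mp h
      exact ⟨0, by omega, c, by omega, h1, Or.inr ⟨hc, h3, h2⟩⟩
    · obtain ⟨c, hc, h1, h2, h3⟩ := (hrow_iff place 1).mp h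
      exact ⟨1, by omega, c, by omega, h1, Or.inr ⟨hc, h3, h2⟩⟩
    · obtain ⟨c, hc, h1, h2, h3⟩ := (hrow_iff place 2).mp h
      exact ⟨2, by omega, c, by omega, h1, Or.inr ⟨hc, h3, h2⟩⟩
    · obtain ⟨k, hk, h1, h2, h3⟩ := (vert_iff place 0 1 2).mp h
      exact ⟨0, by omega, k, hk, h1, Or.inl ⟨by omega, h2, h3⟩⟩
    · obtain ⟨c, hc, h1, h2, h3⟩ := (hrow_iff place 3).mp h
      exact ⟨3, by omega, c, by omega, h1, Or.inr ⟨hc, h3, h2⟩⟩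
    · obtain ⟨k, hk, h1, h2, h3⟩ := (vert_iff place 1 2 3).mp h
      exact ⟨1, by omega, k, hk, h1, Or.inl ⟨by omega, h2, h3⟩⟩
    · obtain ⟨c, hc, h1, h2, h3⟩ := (hrow_iff place 4).mp h
      exact ⟨4, by omega, c, by omega, h1, Or.inr ⟨hc, h3, h2⟩⟩
    · obtain ⟨k, hk, h1, h2, h3⟩ := (vert_iff place 2 3 4).mp h
      exact ⟨2, by omega, k, hk, h1, Or.inl ⟨by omega, h2, h3⟩⟩
  · rintro ⟨r, hr, c, hc, hP, (⟨h2, hA, hB⟩ | ⟨h2, hA, hB⟩)⟩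
    · interval_cases r
      · exact Or.inr (Or.inr (Or.inr (Or.inl
          ((vert_iff place 0 1 2).mpr ⟨c, hc, hP, hA, hB⟩))))
      · exact Or.inr (Or.inr (Or.inr (Or.inr (Or.inr (Or.inl
          ((vert_iff place 1 2 3).mpr ⟨c, hc, hP, hA, hB⟩))))))
      · exact Or.inr (Or.inr (Or.inr (Or.inr (Or.inr (Or.inr (Or.inr
          ((vert_iff place 2 3 4).mpr ⟨c, hc, hP, hA, hB⟩)))))))
    · interval_cases r
      · exact Or.inl ((hrow_iff place 0).mpr ⟨c, h2, hP, hB, hA⟩)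
      · exact Or.inr (Or.inl ((hrow_iff place 1).mpr ⟨c, h2, hP, hB, hA⟩))
      · exact Or.inr (Or.inr (Or.inl ((hrow_iff place 2).mpr ⟨c, h2, hP, hB, hA⟩)))
      · exact Or.inr (Or.inr (Or.inr (Or.inr (Or.inl
          ((hrow_iff place 3).mpr ⟨c, h2, hP, hB, hA⟩)))))
      · exact Or.inr (Or.inr (Or.inr (Or.inr (Or.inr (Or.inr (Or.inl
          ((hrow_iff place 4).mpr ⟨c, h2, hP, hB, hA⟩)))))))

-- Each of A's four probes is one of B's two forward windows at the pair's
-- top/left 'P' (and conversely), so the two scans find the same grids.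
theorem check3_eq_alt (place : List String) : check3 place = check3_alt place := by
  rw [Bool.eq_iff_iff, A_iff place, B_iff place]
  constructor
  · rintro ⟨row, hr, col, hc, hP, (⟨h2, hA, hB⟩ | ⟨h2, hA, hB⟩ | ⟨h2, hA, hB⟩ | ⟨h2, hA, hB⟩)⟩
    · refine ⟨row - 2, by omega, col, hc, hA, Or.inl ⟨by omega, ?_, ?_⟩⟩
      · have e : row - 2 + 2 = row := by omega
        rw [e]; exact hP
      · have e : row - 2 + 1 = row - 1 := by omega
        rw [e]; exact hB
    · exact ⟨row, hr, col, hc, hP, Or.inl ⟨h2, hA, hB⟩⟩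
    · refine ⟨row, hr, col - 2, by omega, hA, Or.inr ⟨by omega, ?_, ?_⟩⟩
      · have e : col - 2 + 2 = col := by omega
        rw [e]; exact hP
      · have e : col - 2 + 1 = col - 1 := by omega
        rw [e]; exact hB
    · exact ⟨row, hr, col, hc, hP, Or.inr ⟨h2, hA, hB⟩⟩
  · rintro ⟨r, hr, c, hc, hP, (⟨h2, hA, hB⟩ | ⟨h2, hA, hB⟩)⟩
    · exact ⟨r, hr, c, hc, hP, Or.inr (Or.inl ⟨h2, hA, hB⟩)⟩
    · exact ⟨r, hr, c, hc, hP, Or.inr (Or.inr (Or.inr ⟨h2, hA, hB⟩))⟩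

-- ===== VERDICT (by name: the statement is the Claim_ definition above) =====
theorem check3_spec : Claim_equal_check3 := by
  intro place _ _
  exact check3_eq_alt place
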